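-- pv_equiv track=rewrite | github.com/SneyAristi/TrabajosHPC | Ejercicios_clase/grises_secuencial.py | generar_rutas
-- ===== SOURCE A (Python) =====
-- import itertools
--
-- def generar_rutas(ciudades):
--     """Genera todas las rutas posibles empezando desde la ciudad 0."""
--     n = len(ciudades)
--     indices = list(range(n))
--     ciudad_inicial = indices[0]
--     otras_ciudades = indices[1:]
--     rutas = []
--     for perm in itertools.permutations(otras_ciudades):
--         ruta = [ciudad_inicial] + list(perm) + [ciudad_inicial]
--         rutas.append(ruta)
--     return rutas
-- ===== SOURCE B (Python) =====
-- def generar_rutas(ciudades):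
--     """Genera todas las rutas posibles empezando desde la ciudad 0."""
--     indices = list(range(len(ciudades)))
--     ciudad_inicial = indices[0]
--     rutas = []
--
--     def backtrack(current, remaining):
--         if not remaining:
--             rutas.append([ciudad_inicial] + current + [ciudad_inicial])
--             return
--         for i in range(len(remaining)):
--             backtrack(current + [remaining[i]], remaining[:i] + remaining[i + 1:])
--
--     backtrack([], indices[1:])
--     return rutas
-- ===== Notes on version B (the rewrite author's own statement) =====
-- stated objective: alternative
-- what changed: Replaces itertools.permutations with a recursive backtracking generator that builds each route by in-order selection from a remaining-indices list, emitting routes in the same lexicographic order.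
import Mathlib
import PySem

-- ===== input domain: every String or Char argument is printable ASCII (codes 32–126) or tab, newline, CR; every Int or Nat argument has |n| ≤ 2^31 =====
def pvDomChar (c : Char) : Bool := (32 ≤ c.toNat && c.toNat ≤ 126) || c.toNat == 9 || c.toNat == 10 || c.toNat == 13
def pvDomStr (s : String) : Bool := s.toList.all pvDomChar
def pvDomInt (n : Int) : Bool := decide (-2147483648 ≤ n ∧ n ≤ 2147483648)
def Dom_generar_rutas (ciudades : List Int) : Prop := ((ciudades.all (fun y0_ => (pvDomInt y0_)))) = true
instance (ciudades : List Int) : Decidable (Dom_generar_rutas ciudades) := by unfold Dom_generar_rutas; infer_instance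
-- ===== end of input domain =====

-- B replaces itertools.permutations by a recursive backtracking generator (same
-- lexicographic order, same cost): objective 'alternative', not faster.

-- ===== PORT A =====
-- itertools.permutations(l) emitted in its exact order: pick each element of l in
-- list order first, then permute the rest; pySelections lists (picked, rest) pairs.
def pySelections : List Int → List (Int × List Int)
  | [] => []
  | x :: xs => (x, xs) :: (pySelections xs).map (fun p => (p.1, x :: p.2))

-- fuel = length of the list (a totality guard only; always called with fuel = l.length)
def pyPermsAux : Nat → List Int → List (List Int)
  | 0, _ => [[]]
  | n + 1, l => (pySelections l).flatMap (fun p => (pyPermsAux n p.2).map (fun q => p.1 :: q))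

def generar_rutas (ciudades : List Int) : List (List Int) :=
  let n := ciudades.length
  let indices := PySem.List.pyRange 0 n 1
  match PySem.List.pyGet? indices 0 with
  | none => []  -- IndexError in Python: excluded by Pre_
  | some ciudad_inicial =>
    let otras := PySem.List.slice indices (some 1) none
    (pyPermsAux otras.length otras).foldl
      (fun rutas perm => rutas ++ [[ciudad_inicial] ++ perm ++ [ciudad_inicial]]) []

-- ===== PORT B =====
-- backtrack(current, remaining): rutas is the accumulator acc; the fuel argument is a
-- totality guard only (recursion depth = remaining.length, never exhausted as called).
mutual
def btB (start : Int) (fuel : Nat) (current remaining : List Int)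
    (acc : List (List Int)) : List (List Int) :=
  match remaining with
  | [] => acc ++ [[start] ++ current ++ [start]]
  | r :: rs =>
    match fuel with
    | 0 => acc
    | f + 1 => loopB start f [] (r :: rs) current acc
termination_by (fuel, 0, 0)
def loopB (start : Int) (fuel : Nat) (pre rest current : List Int)
    (acc : List (List Int)) : List (List Int) :=
  match rest with
  | [] => acc
  | r :: rs =>
    loopB start fuel (pre ++ [r]) rs current (btB start fuel (current ++ [r]) (pre ++ rs) acc)
termination_by (fuel, 1, rest.length)
end

def generar_rutas_alt (ciudades : List Int) : List (List Int) :=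
  let indices := PySem.List.pyRange 0 ciudades.length 1
  match PySem.List.pyGet? indices 0 with
  | none => []  -- IndexError in Python: excluded by Pre_
  | some ciudad_inicial =>
    let otras := PySem.List.slice indices (some 1) none
    btB ciudad_inicial otras.length [] otras []

-- ===== PRECONDITION & SPEC =====
-- Pre_ excludes only the empty list, on which Python A raises IndexError (indices[0]).
def Pre_generar_rutas (ciudades : List Int) : Prop := ciudades ≠ []
instance (ciudades : List Int) : Decidable (Pre_generar_rutas ciudades) := by
  unfold Pre_generar_rutas; infer_instance

def pvWitness_generar_rutas : List Int := ([5, 7, 9] : List Int)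

def Spec_generar_rutas (ciudades : List Int) (out : List (List Int)) : Prop := out = generar_rutas_alt ciudades
instance (ciudades : List Int) (out : List (List Int)) : Decidable (Spec_generar_rutas ciudades out) := by unfold Spec_generar_rutas; infer_instance

-- ===== CLAIM (what is proved, stated in full; the proofs are below) =====
def Claim_equal_generar_rutas : Prop := ∀ (ciudades : List Int), Dom_generar_rutas ciudades → Pre_generar_rutas ciudades → Spec_generar_rutas ciudades (generar_rutas ciudades)

-- ===== LEMMAS AND PROOFS =====

theorem foldl_append_route (l : List (List Int)) (a : List (List Int)) (f : List Int → List Int) :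
    l.foldl (fun rutas perm => rutas ++ [f perm]) a = a ++ l.map f := by
  induction l generalizing a with
  | nil => simp
  | cons x xs ih => simp [List.foldl_cons, ih, List.append_assoc]

theorem selections_snd_length (l : List Int) :
    ∀ p ∈ pySelections l, p.2.length + 1 = l.length := by
  induction l with
  | nil => simp [pySelections]
  | cons x xs ih =>
    intro p hp
    simp only [pySelections, List.mem_cons, List.mem_map] at hp
    rcases hp with rfl | ⟨q, hq, rfl⟩
    · simp
    · have := ih q hq; simp at this ⊢; omega

-- btB computes acc ++ all routes [start]++current++perm++[start], perm over
-- itertools-ordered permutations of remaining, provided fuel ≥ remaining.length.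
theorem btB_eq : ∀ (fuel : Nat) (start : Int) (current remaining : List Int)
    (acc : List (List Int)), remaining.length ≤ fuel →
    btB start fuel current remaining acc =
      acc ++ (pyPermsAux remaining.length remaining).map
        (fun q => [start] ++ (current ++ q) ++ [start]) := by
  intro fuel
  induction fuel with
  | zero =>
    intro start current remaining acc h
    have : remaining = [] := by cases remaining <;> simp_all
    subst this
    simp [btB, pyPermsAux]
  | succ f ih =>
    intro start current remaining acc h
    -- inner loop lemma, by induction on rest
    have loop_eq : ∀ (rest pre : List Int) (current : List Int) (acc : List (List Int)),
        pre.length + rest.length ≤ f + 1 →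
        loopB start f pre rest current acc =
          acc ++ (pySelections rest).flatMap (fun p =>
            (pyPermsAux (pre ++ p.2).length (pre ++ p.2)).map
              (fun q => [start] ++ ((current ++ [p.1]) ++ q) ++ [start])) := by
      intro rest
      induction rest with
      | nil => intro pre current acc _; simp [loopB, pySelections]
      | cons r rs ihr =>
        intro pre current acc hlen
        have hbt := ih start (current ++ [r]) (pre ++ rs) acc (by simp at hlen ⊢; omega)
        simp only [loopB]
        rw [hbt, ihr (pre ++ [r]) current _ (by simp at hlen ⊢; omega)]
        simp only [pySelections, List.flatMap_cons, List.flatMap_map]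
        simp [List.append_assoc]
    cases remaining with
    | nil => simp [btB, pyPermsAux]
    | cons r rs =>
      have h1 : btB start (f + 1) current (r :: rs) acc = loopB start f [] (r :: rs) current acc := by
        simp [btB]
      rw [h1, loop_eq (r :: rs) [] current acc (by simpa using h)]
      simp only [List.nil_append, List.length_cons, pyPermsAux]
      congr 1
      rw [List.map_flatMap]
      apply List.flatMap_congr
      intro p hp
      have hl : p.2.length = rs.length := by
        have := selections_snd_length (r :: rs) p hp; simp at this; omega
      rw [hl, List.map_map]
      apply List.map_congr_left
      intro q _
      simp [List.append_assoc]

-- ===== VERDICT (by name: the statement is the Claim_ definition above) =====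
theorem generar_rutas_spec : Claim_equal_generar_rutas := by
  intro ciudades _ _
  unfold Spec_generar_rutas generar_rutas generar_rutas_alt
  cases hget : PySem.List.pyGet? (PySem.List.pyRange 0 ciudades.length 1) 0 with
  | none => simp [hget]
  | some s =>
    simp only [hget]
    rw [btB_eq _ s [] _ [] (le_refl _), foldl_append_route]
    simp
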